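-- pv_equiv track=rewrite | github.com/miliar/Code_Jam_Webscraper | solutions_python/Problem_200/323.py | solve
-- ===== SOURCE A (Python) =====
-- def solve(S):
--   top = int(S[0])
--   lowpref = '' if top == 1 else str(top-1)
--   highpref = str(top)
--   i = 1
--   while i<len(S) and int(S[i])>= top:
--     if int(S[i])==top:
--       top = int(S[i])
--       lowpref = lowpref + '9'
--       highpref = highpref+str(top)
--     else:
--       top = int(S[i])
--       lowpref = highpref+str(top-1)
--       highpref = highpref+str(top)
--     i+=1
--   if i==len(S): return highpref
--   while i< len(S):
--     lowpref += '9'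
--     i+=1
--   return lowpref
-- ===== SOURCE B (Python) =====
-- def first_descent(d):
--     i = 1
--     while i < len(d) and d[i] >= d[i - 1]:
--         i += 1
--     return i
--
--
-- def run_start(d, k):
--     while k > 0 and d[k - 1] == d[k]:
--         k -= 1
--     return k
--
--
-- def solve(S):
--     d = [int(c) for c in S]
--     n = len(d)
--     i = first_descent(d)
--     if i == n:
--         return S
--     k = run_start(d, i - 1)
--     prefix = S[:k] + str(d[k] - 1) + '9' * (n - 1 - k)
--     return prefix[1:] if prefix[0] == '0' else prefix
-- ===== Notes on version B (the rewrite author's own statement) =====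
-- stated objective: simpler
-- what changed: A builds low/high candidate strings incrementally while scanning; B instead locates the first descent, backs up over the run of equal digits, then constructs the answer directly as prefix + decremented digit + trailing 9s, stripping one decrement-induced leading zero.
-- outside the precondition, e.g. on solve('010'): A returns '009', B returns '09'
import Mathlib
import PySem

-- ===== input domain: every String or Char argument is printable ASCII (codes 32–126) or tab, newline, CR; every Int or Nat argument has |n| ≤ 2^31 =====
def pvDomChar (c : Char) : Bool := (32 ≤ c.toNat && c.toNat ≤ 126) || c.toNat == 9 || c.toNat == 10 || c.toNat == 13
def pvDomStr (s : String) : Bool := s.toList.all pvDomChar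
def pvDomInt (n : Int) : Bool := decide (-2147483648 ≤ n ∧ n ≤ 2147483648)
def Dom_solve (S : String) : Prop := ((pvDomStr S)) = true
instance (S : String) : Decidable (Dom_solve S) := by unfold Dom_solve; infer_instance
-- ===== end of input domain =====

-- B replaces A's incremental low/high candidate-string bookkeeping by a direct construction
-- (find the first descent, back up over the equal run, decrement once and pad with 9s): simpler, same O(n) cost.

set_option maxRecDepth 10000

-- int(c) for a one-character string; Pre_solve restricts to digit characters, where ofChars? is some
def pvCharInt (c : Char) : Int := (PySem.Int.ofChars? [c]).getD 0

-- ===== PORT A =====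
-- A's trailing `while i < len(S): lowpref += '9'` loop
def pvFill9 (low : String) (m : Nat) : String :=
  match m with
  | 0 => low
  | j + 1 => pvFill9 (low ++ "9") j

-- A's main while loop, recursing over the digits int(S[i]), int(S[i+1]), … not yet consumed
def pvLoopA (ds : List Int) (top : Int) (low high : String) : String :=
  match ds with
  | [] => high                                   -- i == len(S): return highpref
  | d :: rest =>
      if d ≥ top then
        if d = top then
          pvLoopA rest d (low ++ "9") (high ++ PySem.Int.toStr d)
        else
          pvLoopA rest d (high ++ PySem.Int.toStr (d - 1)) (high ++ PySem.Int.toStr d)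
      else pvFill9 low (rest.length + 1)         -- the loop after `if i==len(S)`

def solve (S : String) : String :=
  match S.toList with
  | [] => ""                                     -- Python raises IndexError on S[0]; Pre_solve excludes ""
  | c :: rest =>
      let top := pvCharInt c
      let low := if top = 1 then "" else PySem.Int.toStr (top - 1)
      pvLoopA (rest.map pvCharInt) top low (PySem.Int.toStr top)

-- ===== PORT B =====
-- `while i < len(d) and d[i] >= d[i-1]: i += 1` (indices in range inside Pre_, so getD's default is never read)
def pvFirstDescentAux (d : List Int) (i : Nat) : Nat :=
  if h : i < d.length ∧ d.getD (i - 1) 0 ≤ d.getD i 0 then pvFirstDescentAux d (i + 1) else i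
termination_by d.length - i
decreasing_by omega

def pvFirstDescent (d : List Int) : Nat := pvFirstDescentAux d 1

-- `while k > 0 and d[k-1] == d[k]: k -= 1`
def pvRunStart (d : List Int) (k : Nat) : Nat :=
  match k with
  | 0 => 0
  | j + 1 => if d.getD j 0 = d.getD (j + 1) 0 then pvRunStart d j else j + 1

def solve_alt (S : String) : String :=
  let d := S.toList.map pvCharInt
  let n := d.length
  let i := pvFirstDescent d
  if i = n then S
  else
    let k := pvRunStart d (i - 1)
    -- S[:k] ++ str(d[k]-1) ++ '9'*(n-1-k); 0 ≤ k ≤ n, so the slice is List.take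
    let pre := String.ofList (S.toList.take k) ++ PySem.Int.toStr (d.getD k 0 - 1)
                 ++ String.ofList (List.replicate (n - 1 - k) '9')
    -- the pre[0] zero test and the pre[1:] slice; pre is nonempty here
    if pre.toList.headD ' ' = '0' then String.ofList pre.toList.tail else pre

-- ===== PRECONDITION & SPEC =====
-- Pre_ excludes (i) non-digit or empty strings, on which A raises (ValueError / IndexError), and
-- (ii) non-tidy strings with a leading zero digit, on which A propagating that zero into the
-- answer ('010' -> '009') is an accident of its prefix bookkeeping while B drops it ('010' -> '09').
def Pre_solve (S : String) : Prop :=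
  PySem.Str.strIsdigit S = true ∧
    (S.toList.headD ' ' ≠ '0' ∨ List.IsChain (· ≤ ·) S.toList)
instance (S : String) : Decidable (Pre_solve S) := by unfold Pre_solve; infer_instance

def pvWitness_solve : String := "132"

def Spec_solve (S : String) (out : String) : Prop := out = solve_alt S
instance (S : String) (out : String) : Decidable (Spec_solve S out) := by unfold Spec_solve; infer_instance

-- ===== CLAIM (what is proved, stated in full; the proofs are below) =====
def Claim_equal_solve : Prop := ∀ (S : String), Dom_solve S → Pre_solve S → Spec_solve S (solve S)

-- ===== LEMMAS AND PROOFS =====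

-- the ten digit characters, for case analysis
def pvDigits : List Char := ['0', '1', '2', '3', '4', '5', '6', '7', '8', '9']

-- spec-side abbreviations
def pvNines (m : Nat) : String := String.ofList (List.replicate m '9')

def pvLastVal (p : List Char) : Int := (p.map pvCharInt).getD (p.length - 1) 0

-- the value A's lowpref holds after the nondecreasing prefix p has been consumed
def pvLowStr (p : List Char) : String :=
  let d := p.map pvCharInt
  let k := pvRunStart d (p.length - 1)
  if k = 0 ∧ d.getD 0 0 = 1 then pvNines (p.length - 1)
  else String.ofList (p.take k) ++ PySem.Int.toStr (d.getD k 0 - 1) ++ pvNines (p.length - 1 - k)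

-- digit-character facts (10-way case analysis)
theorem pv_dig_toChars : ∀ c ∈ pvDigits, PySem.Int.toChars (pvCharInt c) = [c] := by
  intro c hc
  simp only [pvDigits, List.mem_cons, List.not_mem_nil, or_false] at hc
  rcases hc with rfl|rfl|rfl|rfl|rfl|rfl|rfl|rfl|rfl|rfl <;> decide

theorem pv_dig_bounds : ∀ c ∈ pvDigits, 0 ≤ pvCharInt c ∧ pvCharInt c ≤ 9 := by
  intro c hc
  simp only [pvDigits, List.mem_cons, List.not_mem_nil, or_false] at hc
  rcases hc with rfl|rfl|rfl|rfl|rfl|rfl|rfl|rfl|rfl|rfl <;> decide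

theorem pv_dig_zero : ∀ c ∈ pvDigits, (pvCharInt c = 0 ↔ c = '0') := by
  intro c hc
  simp only [pvDigits, List.mem_cons, List.not_mem_nil, or_false] at hc
  rcases hc with rfl|rfl|rfl|rfl|rfl|rfl|rfl|rfl|rfl|rfl <;> decide

theorem pv_dig_mono : ∀ c ∈ pvDigits, ∀ c' ∈ pvDigits, (pvCharInt c ≤ pvCharInt c' ↔ c ≤ c') := by
  intro c hc c' hc'
  simp only [pvDigits, List.mem_cons, List.not_mem_nil, or_false] at hc hc'
  rcases hc with rfl|rfl|rfl|rfl|rfl|rfl|rfl|rfl|rfl|rfl <;>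
    rcases hc' with rfl|rfl|rfl|rfl|rfl|rfl|rfl|rfl|rfl|rfl <;> decide

theorem pv_toChars_pred (v : Int) (h1 : 2 ≤ v) (h2 : v ≤ 9) :
    PySem.Int.toChars (v - 1) ≠ [] ∧ (PySem.Int.toChars (v - 1)).headD ' ' ≠ '0' := by
  interval_cases v <;> decide

-- string plumbing
theorem pv_str_eq_ofList (s : String) : s = String.ofList s.toList := by simp

theorem pv_toStr_toList (n : Int) : (PySem.Int.toStr n).toList = PySem.Int.toChars n :=
  PySem.Int.toList_toStr n

theorem pv_nines_add (a b : Nat) : pvNines a ++ pvNines b = pvNines (a + b) := by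
  rw [pvNines, pvNines, pvNines, ← String.ofList_append, ← List.replicate_add]

theorem pv_nine_lit : ("9" : String) = pvNines 1 := by decide

theorem pv_fill9_eq (m : Nat) : ∀ s : String, pvFill9 s m = s ++ pvNines m := by
  induction m with
  | zero => intro s; simp [pvFill9, pvNines]
  | succ j ih =>
      intro s
      rw [pvFill9, ih, String.append_assoc, pv_nine_lit, pv_nines_add, Nat.add_comm]

-- pvFirstDescentAux finds exactly the first descent
theorem pv_fdAux_spec (d : List Int) (m : Nat)
    (hnd : ∀ j : Nat, 1 ≤ j → j < m → d.getD (j - 1) 0 ≤ d.getD j 0)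
    (hend : m = d.length ∨ (m < d.length ∧ d.getD m 0 < d.getD (m - 1) 0)) :
    ∀ i : Nat, 1 ≤ i → i ≤ m → pvFirstDescentAux d i = m := by
  have key : ∀ n : Nat, ∀ i : Nat, m - i = n → 1 ≤ i → i ≤ m → pvFirstDescentAux d i = m := by
    intro n
    induction n with
    | zero =>
        intro i hn h1 h2
        have : i = m := by omega
        subst this
        rcases hend with h | h
        · rw [pvFirstDescentAux, dif_neg (by omega)]
        · rw [pvFirstDescentAux, dif_neg (by omega)]
    | succ n ih =>
        intro i hn h1 h2
        have hi : i < m := by omega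
        have hil : i < d.length := by rcases hend with h | h <;> omega
        rw [pvFirstDescentAux, dif_pos ⟨hil, hnd i h1 hi⟩]
        exact ih (i + 1) (by omega) (by omega) (by omega)
  intro i h1 h2; exact key (m - i) i rfl h1 h2

theorem pv_rs_le (d : List Int) (k : Nat) : pvRunStart d k ≤ k := by
  induction k with
  | zero => simp [pvRunStart]
  | succ j ih =>
      rw [pvRunStart]
      split
      · omega
      · omega

theorem pv_rs_append (d e : List Int) (k : Nat) (h : k < d.length) :
    pvRunStart (d ++ e) k = pvRunStart d k := by
  induction k with
  | zero => simp [pvRunStart]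
  | succ j ih =>
      rw [pvRunStart, pvRunStart,
        List.getD_append _ _ _ _ (by omega), List.getD_append _ _ _ _ (by omega)]
      split
      · exact ih (by omega)
      · rfl

-- nondecreasing in getD form
def pvND (d : List Int) : Prop := ∀ j : Nat, 1 ≤ j → j < d.length → d.getD (j - 1) 0 ≤ d.getD j 0

theorem pv_lastVal_concat (p : List Char) (c : Char) :
    pvLastVal (p ++ [c]) = pvCharInt c := by
  unfold pvLastVal
  rw [List.map_append]
  simp

theorem pv_lastVal_getD (p : List Char) :
    pvLastVal p = (p.map pvCharInt).getD (p.length - 1) 0 := rfl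

theorem pv_getD_concat_self (d : List Int) (v : Int) :
    (d ++ [v]).getD d.length 0 = v := by
  have := List.getD_append_right d [v] (n := d.length) (d := (0 : Int)) (le_refl _)
  simpa using this

theorem pv_nd_concat (p : List Char) (c : Char) (hnd : pvND (p.map pvCharInt)) (hp : p ≠ [])
    (hle : pvLastVal p ≤ pvCharInt c) : pvND ((p ++ [c]).map pvCharInt) := by
  intro j h1 h2
  simp only [List.map_append, List.map_cons, List.map_nil] at *
  simp only [List.length_append, List.length_cons, List.length_nil, List.length_map] at h2
  have hplen : 1 ≤ p.length := List.length_pos_iff.mpr hp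
  by_cases hj : j < p.length
  · rw [List.getD_append _ _ _ _ (by simp; omega), List.getD_append _ _ _ _ (by simp; omega)]
    exact hnd j h1 (by simpa using hj)
  · have hj' : j = p.length := by omega
    subst hj'
    rw [List.getD_append _ _ _ _ (by simp; omega)]
    have hself : (List.map pvCharInt p ++ [pvCharInt c]).getD p.length 0 = pvCharInt c := by
      have h := pv_getD_concat_self (p.map pvCharInt) (pvCharInt c)
      simpa using h
    rw [hself]
    simpa [pvLastVal] using hle

-- runStart one step up, at the end of the extended list
theorem pv_rs_concat_eq (p : List Char) (c : Char) (hp : p ≠ [])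
    (heq : pvCharInt c = pvLastVal p) :
    pvRunStart (p.map pvCharInt ++ [pvCharInt c]) p.length
      = pvRunStart (p.map pvCharInt) (p.length - 1) := by
  have hplen : 1 ≤ p.length := List.length_pos_iff.mpr hp
  obtain ⟨j, hj⟩ : ∃ j, p.length = j + 1 := ⟨p.length - 1, by omega⟩
  rw [hj, pvRunStart]
  have hg1 : (p.map pvCharInt ++ [pvCharInt c]).getD j 0 = (p.map pvCharInt).getD j 0 := by
    rw [List.getD_append _ _ _ _ (by simp; omega)]
  have hg2 : (p.map pvCharInt ++ [pvCharInt c]).getD (j + 1) 0 = pvCharInt c := by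
    rw [show j + 1 = (List.map pvCharInt p).length by simp; omega, pv_getD_concat_self]
  rw [hg1, hg2, if_pos (by rw [heq, pv_lastVal_getD, hj]; simp),
    pv_rs_append _ _ _ (by simp; omega)]
  simp

theorem pv_rs_concat_gt (p : List Char) (c : Char) (hp : p ≠ [])
    (hgt : pvLastVal p < pvCharInt c) :
    pvRunStart (p.map pvCharInt ++ [pvCharInt c]) p.length = p.length := by
  have hplen : 1 ≤ p.length := List.length_pos_iff.mpr hp
  obtain ⟨j, hj⟩ : ∃ j, p.length = j + 1 := ⟨p.length - 1, by omega⟩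
  rw [hj, pvRunStart]
  have hg1 : (p.map pvCharInt ++ [pvCharInt c]).getD j 0 = (p.map pvCharInt).getD j 0 := by
    rw [List.getD_append _ _ _ _ (by simp; omega)]
  have hg2 : (p.map pvCharInt ++ [pvCharInt c]).getD (j + 1) 0 = pvCharInt c := by
    rw [show j + 1 = (List.map pvCharInt p).length by simp; omega, pv_getD_concat_self]
  rw [hg1, hg2, if_neg]
  rw [pv_lastVal_getD, hj] at hgt
  simp only [Nat.add_sub_cancel] at hgt
  omega

-- the two ways A's lowpref evolves, expressed against pvLowStr
theorem pv_lowStr_eq_run (p : List Char) (c : Char) (hp : p ≠ [])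
    (heq : pvCharInt c = pvLastVal p) :
    pvLowStr (p ++ [c]) = pvLowStr p ++ "9" := by
  have hplen : 1 ≤ p.length := List.length_pos_iff.mpr hp
  unfold pvLowStr
  simp only [List.map_append, List.map_cons, List.map_nil, List.length_append,
    List.length_cons, List.length_nil, Nat.add_sub_cancel]
  rw [pv_rs_concat_eq p c hp heq]
  set k := pvRunStart (p.map pvCharInt) (p.length - 1) with hk
  have hkle : k ≤ p.length - 1 := pv_rs_le _ _
  have hg0 : (p.map pvCharInt ++ [pvCharInt c]).getD 0 0 = (p.map pvCharInt).getD 0 0 := by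
    rw [List.getD_append _ _ _ _ (by simp; omega)]
  have hgk : (p.map pvCharInt ++ [pvCharInt c]).getD k 0 = (p.map pvCharInt).getD k 0 := by
    rw [List.getD_append _ _ _ _ (by simp; omega)]
  have htake : (p ++ [c]).take k = p.take k := List.take_append_of_le_length (by omega)
  rw [hg0, hgk, htake]
  split_ifs
  · rw [pv_nine_lit, pv_nines_add, show p.length - 1 + 1 = p.length from by omega]
  · conv_rhs => rw [String.append_assoc, String.append_assoc, pv_nine_lit, pv_nines_add]
    rw [show p.length - 1 - k + 1 = p.length - k from by omega, ← String.append_assoc]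

theorem pv_lowStr_eq_up (p : List Char) (c : Char) (hp : p ≠ [])
    (hgt : pvLastVal p < pvCharInt c) :
    pvLowStr (p ++ [c]) = String.ofList p ++ PySem.Int.toStr (pvCharInt c - 1) := by
  have hplen : 1 ≤ p.length := List.length_pos_iff.mpr hp
  unfold pvLowStr
  simp only [List.map_append, List.map_cons, List.map_nil, List.length_append,
    List.length_cons, List.length_nil, Nat.add_sub_cancel]
  rw [pv_rs_concat_gt p c hp hgt, if_neg (by omega)]
  have hgk : (p.map pvCharInt ++ [pvCharInt c]).getD p.length 0 = pvCharInt c := by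
    rw [show p.length = (List.map pvCharInt p).length by simp, pv_getD_concat_self]
  have htake : (p ++ [c]).take p.length = p := by
    rw [List.take_append_of_le_length (le_refl _), List.take_length]
  rw [hgk, htake, show p.length - p.length = 0 from by omega]
  simp [pvNines]

-- B on a whole nondecreasing digit string returns it unchanged
theorem pv_alt_tidy (cs : List Char) (hne : cs ≠ []) (hnd : pvND (cs.map pvCharInt)) :
    solve_alt (String.ofList cs) = String.ofList cs := by
  unfold solve_alt pvFirstDescent
  simp only [String.toList_ofList]
  have hlen : 1 ≤ cs.length := List.length_pos_iff.mpr hne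
  rw [pv_fdAux_spec (cs.map pvCharInt) (cs.map pvCharInt).length
    (by intro j h1 h2; exact hnd j h1 (by simpa using h2)) (Or.inl rfl) 1 (le_refl _)
    (by simp; omega)]
  simp

theorem pv_headD_append (a b : List Char) (ha : a ≠ []) : (a ++ b).headD ' ' = a.headD ' ' := by
  cases a <;> simp_all

theorem pv_headD_take (p : List Char) (k : Nat) (hk : 1 ≤ k) (hkp : k ≤ p.length) :
    (p.take k).headD ' ' = p.headD ' ' := by
  cases p <;> cases k <;> simp_all

-- main invariant: running A's loop from a consumed nondecreasing prefix p gives B's answer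
theorem pv_loopA_eq (rest : List Char) : ∀ p : List Char, p ≠ [] →
    (∀ c ∈ p ++ rest, c ∈ pvDigits) →
    pvND (p.map pvCharInt) →
    ((p ++ rest).headD ' ' ≠ '0' ∨ List.IsChain (· ≤ ·) (p ++ rest)) →
    pvLoopA (rest.map pvCharInt) (pvLastVal p) (pvLowStr p) (String.ofList p)
      = solve_alt (String.ofList (p ++ rest)) := by
  induction rest with
  | nil =>
      intro p hp hdig hnd _
      rw [List.append_nil, List.map_nil, pvLoopA, pv_alt_tidy p hp hnd]
  | cons c rest' ih =>
      intro p hp hdig hnd hh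
      have hplen : 1 ≤ p.length := List.length_pos_iff.mpr hp
      have hc : c ∈ pvDigits := hdig c (by simp)
      have hhigh : String.ofList p ++ PySem.Int.toStr (pvCharInt c) = String.ofList (p ++ [c]) := by
        rw [String.ofList_append]
        congr 1
        rw [pv_str_eq_ofList (PySem.Int.toStr _), pv_toStr_toList, pv_dig_toChars c hc]
      rw [List.map_cons, pvLoopA]
      by_cases hge : pvCharInt c ≥ pvLastVal p
      · rw [if_pos hge]
        have hassoc : (p ++ [c]) ++ rest' = p ++ c :: rest' := by simp
        have hdig' : ∀ x ∈ (p ++ [c]) ++ rest', x ∈ pvDigits := by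
          rw [hassoc]; exact hdig
        have hnd' : pvND ((p ++ [c]).map pvCharInt) := pv_nd_concat p c hnd hp hge
        have hh' : ((p ++ [c]) ++ rest').headD ' ' ≠ '0'
            ∨ List.IsChain (· ≤ ·) ((p ++ [c]) ++ rest') := by rw [hassoc]; exact hh
        have hrec := ih (p ++ [c]) (by simp) hdig' hnd' hh'
        rw [hassoc, pv_lastVal_concat] at hrec
        by_cases heq : pvCharInt c = pvLastVal p
        · rw [if_pos heq, hhigh, ← pv_lowStr_eq_run p c hp heq]
          exact hrec
        · rw [if_neg heq, hhigh, ← pv_lowStr_eq_up p c hp (by omega)]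
          exact hrec
      · rw [if_neg hge]
        push_neg at hge
        have hlastmem : p.getLast hp ∈ pvDigits := hdig _ (by simp [List.getLast_mem])
        have hlastval : pvLastVal p = pvCharInt (p.getLast hp) := by
          rw [pv_lastVal_getD, List.getD_eq_getElem _ _ (by simp; omega)]
          simp [List.getLast_eq_getElem]
        have hh0 : (p ++ c :: rest').headD ' ' ≠ '0' := by
          rcases hh with h | h
          · exact h
          · exfalso
            rw [List.isChain_append] at h
            have hle : p.getLast hp ≤ c := h.2.2 _ (List.getLast?_eq_some_getLast hp) _
              (by simp)
            have := (pv_dig_mono _ hlastmem _ hc).mpr hle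
            rw [← hlastval] at this
            omega
        have hhead0 : p.headD ' ' ≠ '0' := by
          rwa [pv_headD_append p (c :: rest') hp] at hh0
        have hmap : (p ++ c :: rest').map pvCharInt
            = p.map pvCharInt ++ (pvCharInt c :: rest'.map pvCharInt) := by simp
        have hlenfull : ((p ++ c :: rest').map pvCharInt).length
            = p.length + (rest'.length + 1) := by simp
        have hfd : pvFirstDescent ((p ++ c :: rest').map pvCharInt) = p.length := by
          unfold pvFirstDescent
          apply pv_fdAux_spec _ p.length
          · intro j h1 h2
            rw [hmap, List.getD_append _ _ _ _ (by simp; omega),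
              List.getD_append _ _ _ _ (by simp; omega)]
            exact hnd j h1 (by simpa using h2)
          · right
            refine ⟨by omega, ?_⟩
            have hg1 : ((p ++ c :: rest').map pvCharInt).getD p.length 0 = pvCharInt c := by
              rw [hmap]
              have := List.getD_append_right (p.map pvCharInt)
                (pvCharInt c :: rest'.map pvCharInt) (n := p.length) (d := (0 : Int)) (by simp)
              simpa using this
            have hg2 : ((p ++ c :: rest').map pvCharInt).getD (p.length - 1) 0
                = pvLastVal p := by
              rw [hmap, List.getD_append _ _ _ _ (by simp; omega), pv_lastVal_getD]
            rw [hg1, hg2]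
            exact hge
          · exact le_refl _
          · omega
        have hrs : pvRunStart ((p ++ c :: rest').map pvCharInt) (p.length - 1)
            = pvRunStart (p.map pvCharInt) (p.length - 1) := by
          rw [hmap]
          exact pv_rs_append _ _ _ (by simp; omega)
        set k := pvRunStart (p.map pvCharInt) (p.length - 1) with hkdef
        have hkle : k ≤ p.length - 1 := pv_rs_le _ _
        have hgdk : ((p ++ c :: rest').map pvCharInt).getD k 0
            = (p.map pvCharInt).getD k 0 := by
          rw [hmap, List.getD_append _ _ _ _ (by simp; omega)]
        have htakek : (p ++ c :: rest').take k = p.take k :=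
          List.take_append_of_le_length (by omega)
        unfold solve_alt
        simp only [String.toList_ofList]
        rw [hfd, hrs, hgdk, htakek, if_neg (by rw [hlenfull]; omega), hlenfull]
        rw [pv_fill9_eq]
        simp only [List.length_map]
        unfold pvLowStr
        simp only
        rw [← hkdef]
        have hd0 : (p.map pvCharInt).getD 0 0 = pvCharInt (p.headD ' ') := by
          cases p with
          | nil => exact absurd rfl hp
          | cons a as => simp
        have hd0mem : p.headD ' ' ∈ pvDigits := by
          cases p with
          | nil => exact absurd rfl hp
          | cons a as => exact hdig a (by simp)
        by_cases hcase : k = 0 ∧ (p.map pvCharInt).getD 0 0 = 1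
        · obtain ⟨hk0, hd1⟩ := hcase
          rw [if_pos ⟨hk0, hd1⟩, hk0, hd1]
          have hpre : (String.ofList (p.take 0) ++ PySem.Int.toStr (1 - 1)
              ++ String.ofList (List.replicate (p.length + (rest'.length + 1) - 1 - 0) '9')).toList
              = '0' :: List.replicate (p.length + (rest'.length + 1) - 1) '9' := by
            rw [String.toList_append, String.toList_append, pv_toStr_toList]
            simp only [List.take_zero, String.toList_ofList]
            rw [show ((1 : Int) - 1) = 0 from by omega,
              show PySem.Int.toChars 0 = ['0'] from by decide]
            simp
          rw [hpre]
          simp only [List.headD_cons, if_true, List.tail_cons]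
          rw [pv_nines_add, pvNines, show p.length - 1 + (rest'.length + 1)
            = p.length + (rest'.length + 1) - 1 from by omega]
        · rw [if_neg hcase]
          have hkgoal : ((String.ofList (p.take k) ++ PySem.Int.toStr ((p.map pvCharInt).getD k 0 - 1)
              ++ String.ofList (List.replicate (p.length + (rest'.length + 1) - 1 - k) '9'))).toList
              = p.take k ++ PySem.Int.toChars ((p.map pvCharInt).getD k 0 - 1)
                ++ List.replicate (p.length + (rest'.length + 1) - 1 - k) '9' := by
            rw [String.toList_append, String.toList_append, pv_toStr_toList]
            simp
          have hheadne : (p.take k ++ PySem.Int.toChars ((p.map pvCharInt).getD k 0 - 1)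
              ++ List.replicate (p.length + (rest'.length + 1) - 1 - k) '9').headD ' ' ≠ '0' := by
            by_cases hk0 : k = 0
            · have hd1 : (p.map pvCharInt).getD 0 0 ≠ 1 := fun h => hcase ⟨hk0, h⟩
              have hb := pv_dig_bounds _ hd0mem
              have hnz : pvCharInt (p.headD ' ') ≠ 0 := by
                rw [Ne, pv_dig_zero _ hd0mem]; exact hhead0
              have h2le : 2 ≤ (p.map pvCharInt).getD 0 0 := by rw [hd0] at hd1 ⊢; omega
              have h9 : (p.map pvCharInt).getD 0 0 ≤ 9 := by rw [hd0]; omega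
              obtain ⟨hne9, hhd9⟩ := pv_toChars_pred _ h2le h9
              rw [hk0]
              simp only [List.take_zero, List.nil_append]
              rwa [pv_headD_append _ _ hne9]
            · have htne : p.take k ≠ [] := by
                have : (p.take k).length = k := by rw [List.length_take]; omega
                intro h; rw [h] at this; simp at this; omega
              rw [List.append_assoc, pv_headD_append _ _ htne,
                pv_headD_take p k (by omega) (by omega)]
              exact hhead0
          rw [hkgoal, if_neg hheadne]
          rw [String.append_assoc, pv_nines_add, show p.length - 1 - k + (rest'.length + 1)
              = p.length + (rest'.length + 1) - 1 - k from by omega]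
          rfl

-- Pre_solve's isdigit condition, read back as membership in pvDigits
theorem pv_isdigit_mem (c : Char) (h : PySem.Chars.isdigit c = true) : c ∈ pvDigits := by
  simp only [PySem.Chars.isdigit, Bool.and_eq_true, decide_eq_true_eq] at h
  obtain ⟨h1, h2⟩ := h
  rw [Char.le_def] at h1 h2
  have h1' : 48 ≤ c.toNat := Nat.succ_le_of_lt h1
  have h2' : c.toNat ≤ 57 := Fin.mk_le_mk.mp h2
  rw [← Char.ofNat_toNat c]
  interval_cases c.toNat <;> decide

theorem pv_strIsdigit_spec (S : String) (h : PySem.Str.strIsdigit S = true) :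
    S.toList ≠ [] ∧ ∀ c ∈ S.toList, c ∈ pvDigits := by
  rw [PySem.Str.strIsdigit_eq] at h
  simp only [PySem.Chars.strIsdigit, Bool.and_eq_true, List.all_eq_true] at h
  refine ⟨?_, fun c hc => pv_isdigit_mem c (h.2 c hc)⟩
  have := h.1
  cases hS : S.toList <;> simp_all

-- pvLowStr and pvLastVal on a one-character string are A's initial lowpref/top
theorem pv_lastVal_single (c : Char) : pvLastVal [c] = pvCharInt c := by
  simp [pvLastVal]

theorem pv_lowStr_single (c : Char) :
    pvLowStr [c] = if pvCharInt c = 1 then "" else PySem.Int.toStr (pvCharInt c - 1) := by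
  by_cases h : pvCharInt c = 1
  · rw [if_pos h]
    unfold pvLowStr
    simp [pvRunStart, h, pvNines]
  · rw [if_neg h]
    unfold pvLowStr
    simp [pvRunStart, pvNines, h]

-- ===== VERDICT (by name: the statement is the Claim_ definition above) =====
theorem solve_spec : Claim_equal_solve := by
  unfold Claim_equal_solve
  intro S _ hpre
  obtain ⟨hdd, hh⟩ := hpre
  obtain ⟨hne, hdig⟩ := pv_strIsdigit_spec S hdd
  unfold Spec_solve
  cases hcs : S.toList with
  | nil => exact absurd hcs hne
  | cons c rest =>
      have hc : c ∈ pvDigits := hdig c (by rw [hcs]; simp)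
      have hstep := pv_loopA_eq rest [c] (by simp)
        (by intro x hx; exact hdig x (by rw [hcs]; simpa using hx))
        (by intro j h1 h2; simp at h2; omega)
        (by rw [show ([c] : List Char) ++ rest = c :: rest from rfl, ← hcs]; exact hh)
      rw [show ([c] : List Char) ++ rest = c :: rest from rfl, ← hcs] at hstep
      rw [← pv_str_eq_ofList S] at hstep
      rw [pv_lastVal_single, pv_lowStr_single] at hstep
      unfold solve
      rw [hcs]
      simp only
      rw [← hstep]
      congr 1
      rw [pv_str_eq_ofList (PySem.Int.toStr _), pv_toStr_toList, pv_dig_toChars c hc]
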